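-- pv_equiv track=rewrite | github.com/tuanacetinkaya/InterviewPractices | src/ransom_note.py | canSpell
-- ===== SOURCE A (Python) =====
-- def canSpell(mag, word):
--     req = []
--     req[:] = word
--     for spl in mag:
--         if spl in req:
--             req.remove(spl)
--     if len(req) == 0:
--         return True
--     return False
-- ===== SOURCE B (Python) =====
-- def canSpell(mag, word):
--     sw = sorted(word)
--     sm = sorted(mag)
--     i = j = 0
--     while i < len(sw) and j < len(sm):
--         if sm[j] == sw[i]:
--             i += 1
--             j += 1
--         elif sm[j] < sw[i]:
--             j += 1
--         else:
--             return False
--     return i == len(sw)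
-- ===== Notes on version B (the rewrite author's own statement) =====
-- stated objective: faster
-- what changed: Replaces A's repeated membership-scan-and-remove over a shrinking list of required letters by sorting both sequences once and deciding multiset inclusion with a single two-pointer merge pass (early exit when the needed letter can no longer appear).
import Mathlib
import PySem

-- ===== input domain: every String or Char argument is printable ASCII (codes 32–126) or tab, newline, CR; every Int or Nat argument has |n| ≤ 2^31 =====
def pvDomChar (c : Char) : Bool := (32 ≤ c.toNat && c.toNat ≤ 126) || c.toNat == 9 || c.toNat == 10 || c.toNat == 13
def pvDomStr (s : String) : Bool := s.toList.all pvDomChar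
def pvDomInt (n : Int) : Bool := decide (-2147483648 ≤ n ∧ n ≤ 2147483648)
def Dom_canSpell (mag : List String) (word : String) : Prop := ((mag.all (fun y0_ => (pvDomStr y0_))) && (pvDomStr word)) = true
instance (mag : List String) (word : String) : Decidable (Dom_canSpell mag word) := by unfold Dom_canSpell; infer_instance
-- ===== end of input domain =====

-- B sorts both sequences once and decides multiset inclusion by a two-pointer merge pass, replacing A's quadratic scan-and-remove over a shrinking list (objective: faster).


-- ===== PORT A =====
-- req[:] = word : the list of word's characters, each as a 1-character string
def canSpell (mag : List String) (word : String) : Bool :=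
  let req0 : List String := word.toList.map (fun c => String.ofList [c])
  let req := mag.foldl (fun req spl =>
    if spl ∈ req then (PySem.List.remove? req spl).getD req else req) req0
  req.length == 0

-- ===== PORT B =====
-- the two-pointer merge walk of Source B's while loop (i over sw, j over sm), as structural recursion
def pvMerge : List String → List String → Bool
  | [], _ => true
  | _ :: _, [] => false
  | x :: sw, y :: sm =>
    if y = x then pvMerge sw sm
    else if y < x then pvMerge (x :: sw) sm
    else false

def canSpell_alt (mag : List String) (word : String) : Bool :=
  let sw := PySem.List.sorted (word.toList.map (fun c => String.ofList [c])) (fun s => s) false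
  let sm := PySem.List.sorted mag (fun s => s) false
  pvMerge sw sm

-- ===== PRECONDITION & SPEC =====
def Spec_canSpell (mag : List String) (word : String) (out : Bool) : Prop := out = canSpell_alt mag word
instance (mag : List String) (word : String) (out : Bool) : Decidable (Spec_canSpell mag word out) := by unfold Spec_canSpell; infer_instance

-- ===== CLAIM (what is proved, stated in full; the proofs are below) =====
def Claim_equal_canSpell : Prop := ∀ (mag : List String) (word : String), Dom_canSpell mag word → Spec_canSpell mag word (canSpell mag word)

-- ===== LEMMAS AND PROOFS =====

-- A's fold removes, per magazine tile, one matching required letter if present: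
-- each remaining count is the initial count truncated-minus the magazine count.
theorem pv_foldA_count (mag : List String) (req : List String) (s : String) :
    (mag.foldl (fun req spl =>
      if spl ∈ req then (PySem.List.remove? req spl).getD req else req) req).count s
      = req.count s - mag.count s := by
  induction mag generalizing req with
  | nil => simp
  | cons x xs ih =>
    simp only [List.foldl_cons]
    by_cases hx : x ∈ req
    · rw [if_pos hx, PySem.List.remove?_eq_some_erase req x hx, Option.getD_some, ih]
      by_cases hsx : s = x
      · subst hsx
        rw [List.count_erase_self, List.count_cons_self]
        omega
      · rw [List.count_erase_of_ne hsx, List.count_cons_of_ne (Ne.symm hsx)]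
    · rw [if_neg hx, ih]
      by_cases hsx : s = x
      · subst hsx
        have h0 : req.count s = 0 := List.count_eq_zero_of_not_mem hx
        rw [h0, List.count_cons_self]
        omega
      · rw [List.count_cons_of_ne (Ne.symm hsx)]

-- A returns true iff every required letter occurs in mag at least as often as in req0
theorem pv_A_iff (mag : List String) (req0 : List String) :
    ((mag.foldl (fun req spl =>
      if spl ∈ req then (PySem.List.remove? req spl).getD req else req) req0).length == 0) = true
      ↔ ∀ s : String, req0.count s ≤ mag.count s := by
  rw [beq_iff_eq, List.length_eq_zero_iff]
  constructor
  · intro h s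
    have := pv_foldA_count mag req0 s
    rw [h] at this
    simp at this
    omega
  · intro h
    by_cases hnil : (mag.foldl (fun req spl =>
        if spl ∈ req then (PySem.List.remove? req spl).getD req else req) req0) = []
    · exact hnil
    · exfalso
      obtain ⟨s, hs⟩ := List.exists_mem_of_ne_nil _ hnil
      have hpos : 0 < (mag.foldl (fun req spl =>
        if spl ∈ req then (PySem.List.remove? req spl).getD req else req) req0).count s :=
        List.count_pos_iff.mpr hs
      have hc := pv_foldA_count mag req0 s
      have hle := h s
      omega

-- merge correctness on sorted lists: pvMerge decides multiset inclusion
theorem pv_merge_iff (sw sm : List String)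
    (hw : sw.Pairwise (· ≤ ·)) (hm : sm.Pairwise (· ≤ ·)) :
    pvMerge sw sm = true ↔ ∀ s : String, sw.count s ≤ sm.count s := by
  induction sm generalizing sw with
  | nil =>
    cases sw with
    | nil => simp [pvMerge]
    | cons x sw' =>
      simp only [pvMerge, List.count_nil]
      constructor
      · intro h; exact absurd h (by simp)
      · intro h
        have := h x
        have : 0 < (x :: sw').count x := List.count_pos_iff.mpr (by simp)
        omega
  | cons y sm' ih =>
    cases sw with
    | nil => simp [pvMerge]
    | cons x sw' =>
      rw [List.pairwise_cons] at hw hm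
      simp only [pvMerge]
      by_cases hyx : y = x
      · subst hyx
        rw [if_pos rfl, ih sw' hw.2 hm.2]
        constructor
        · intro h s
          by_cases hsy : s = y
          · subst hsy
            rw [List.count_cons_self, List.count_cons_self]
            exact Nat.succ_le_succ (h s)
          · rw [List.count_cons_of_ne (Ne.symm hsy), List.count_cons_of_ne (Ne.symm hsy)]
            exact h s
        · intro h s
          have := h s
          by_cases hsy : s = y
          · subst hsy
            rw [List.count_cons_self, List.count_cons_self] at this
            omega
          · rwa [List.count_cons_of_ne (Ne.symm hsy), List.count_cons_of_ne (Ne.symm hsy)] at this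
      · rw [if_neg hyx]
        by_cases hlt : y < x
        · rw [if_pos hlt, ih (x :: sw') (List.pairwise_cons.mpr hw) hm.2]
          have hyx0 : (x :: sw').count y = 0 := by
            apply List.count_eq_zero_of_not_mem
            intro hmem
            rcases List.mem_cons.mp hmem with h' | h'
            · exact absurd (h' ▸ hlt) (lt_irrefl x)
            · exact absurd (lt_of_lt_of_le hlt (hw.1 _ h')) (lt_irrefl _)
          constructor
          · intro h s
            calc (x :: sw').count s ≤ sm'.count s := h s
              _ ≤ (y :: sm').count s := List.count_le_count_cons ..
          · intro h s
            have hs := h s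
            by_cases hsy : s = y
            · subst hsy; rw [hyx0]; omega
            · rwa [List.count_cons_of_ne (Ne.symm hsy)] at hs
        · rw [if_neg hlt]
          have hxy : x < y := lt_of_le_of_ne (le_of_not_gt hlt) (fun h => hyx h.symm)
          have hx0 : (y :: sm').count x = 0 := by
            apply List.count_eq_zero_of_not_mem
            intro hmem
            rcases List.mem_cons.mp hmem with h' | h'
            · exact absurd (h' ▸ hxy) (lt_irrefl y)
            · exact absurd (lt_of_lt_of_le hxy (hm.1 _ h')) (lt_irrefl _)
          constructor
          · intro h; exact absurd h (by simp)
          · intro h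
            have := h x
            rw [hx0, List.count_cons_self] at this
            omega

theorem canSpell_eq (mag : List String) (word : String) :
    canSpell mag word = canSpell_alt mag word := by
  unfold canSpell canSpell_alt
  dsimp only
  set req0 := word.toList.map (fun c => String.ofList [c]) with hreq0
  have hpermw := PySem.List.sorted_perm req0 (fun s : String => s) false
  have hpermm := PySem.List.sorted_perm mag (fun s : String => s) false
  have hw := PySem.List.sorted_pairwise req0 (fun s : String => s) (κ := String)
  have hm := PySem.List.sorted_pairwise mag (fun s : String => s) (κ := String)
  rcases hA : ((mag.foldl (fun req spl =>
      if spl ∈ req then (PySem.List.remove? req spl).getD req else req) req0).length == 0) with _ | _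
  · symm
    rw [Bool.eq_false_iff]
    intro hB
    have hcnt := (pv_merge_iff _ _ hw hm).mp hB
    have : ∀ s : String, req0.count s ≤ mag.count s := by
      intro s
      have := hcnt s
      rwa [hpermw.count_eq, hpermm.count_eq] at this
    exact absurd ((pv_A_iff mag req0).mpr this) (by simp [hA])
  · symm
    rw [pv_merge_iff _ _ hw hm]
    intro s
    rw [hpermw.count_eq, hpermm.count_eq]
    exact (pv_A_iff mag req0).mp hA s

-- ===== VERDICT (by name: the statement is the Claim_ definition above) =====
theorem canSpell_spec : Claim_equal_canSpell := by
  intro mag word _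
  unfold Spec_canSpell
  exact canSpell_eq mag word
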